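-- pv_equiv track=rewrite | github.com/19rehan/scholarpath | smart_discovery.py | detect_country_from_domain
-- ===== SOURCE A (Python) =====
-- def detect_country_from_domain(domain):
--     tlds = {
--         '.uk': 'UK', '.ac.uk': 'UK', '.edu.au': 'Australia',
--         '.au': 'Australia', '.ca': 'Canada', '.de': 'Germany',
--         '.fr': 'France', '.nl': 'Netherlands', '.se': 'Sweden',
--         '.no': 'Norway', '.fi': 'Finland', '.dk': 'Denmark',
--         '.ch': 'Switzerland', '.at': 'Austria', '.be': 'Belgium',
--         '.it': 'Italy', '.es': 'Spain', '.pt': 'Portugal',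
--         '.pl': 'Poland', '.cz': 'Czech Republic', '.tr': 'Turkey',
--         '.sa': 'Saudi Arabia', '.ae': 'UAE', '.qa': 'Qatar',
--         '.jo': 'Jordan', '.cn': 'China', '.jp': 'Japan',
--         '.kr': 'South Korea', '.my': 'Malaysia', '.sg': 'Singapore',
--         '.th': 'Thailand', '.nz': 'New Zealand', '.za': 'South Africa',
--         '.eg': 'Egypt', '.ma': 'Morocco', '.ng': 'Nigeria',
--         '.br': 'Brazil', '.mx': 'Mexico', '.ar': 'Argentina',
--         '.pk': 'Pakistan', '.in': 'India', '.bd': 'Bangladesh',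
--         '.edu': 'USA', '.edu.cn': 'China', '.edu.pk': 'Pakistan',
--     }
--     for tld, country in sorted(tlds.items(), key=lambda x: -len(x[0])):
--         if domain.endswith(tld):
--             return country
--     return "International"
-- ===== SOURCE B (Python) =====
-- _TLD_DATA = (
--     ".uk=UK;.ac.uk=UK;.edu.au=Australia;.au=Australia;.ca=Canada;.de=Germany;"
--     ".fr=France;.nl=Netherlands;.se=Sweden;.no=Norway;.fi=Finland;.dk=Denmark;"
--     ".ch=Switzerland;.at=Austria;.be=Belgium;.it=Italy;.es=Spain;.pt=Portugal;"
--     ".pl=Poland;.cz=Czech Republic;.tr=Turkey;.sa=Saudi Arabia;.ae=UAE;.qa=Qatar;"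
--     ".jo=Jordan;.cn=China;.jp=Japan;.kr=South Korea;.my=Malaysia;.sg=Singapore;"
--     ".th=Thailand;.nz=New Zealand;.za=South Africa;.eg=Egypt;.ma=Morocco;.ng=Nigeria;"
--     ".br=Brazil;.mx=Mexico;.ar=Argentina;.pk=Pakistan;.in=India;.bd=Bangladesh;"
--     ".edu=USA;.edu.cn=China;.edu.pk=Pakistan"
-- )
--
--
-- def detect_country_from_domain(domain):
--     # build the TLD table once from the compact data string
--     tlds = {}
--     for entry in _TLD_DATA.split(';'):
--         tld, country = entry.split('=')
--         tlds[tld] = country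
--     # walk the domain's dot positions left to right (longest suffix first);
--     # the first suffix that is a known TLD key wins
--     for i in range(len(domain)):
--         if domain[i] == '.':
--             suffix = domain[i:]
--             if suffix in tlds:
--                 return tlds[suffix]
--     return "International"
-- ===== Notes on version B (the rewrite author's own statement) =====
-- stated objective: alternative
-- what changed: B stores the TLD table as one compact semicolon-separated data string parsed into a dict, and replaces A's endswith scan over the 45 entries sorted by descending key length with a left-to-right walk of the domain's dot positions that returns the dict value of the first suffix present.
import Mathlib
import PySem

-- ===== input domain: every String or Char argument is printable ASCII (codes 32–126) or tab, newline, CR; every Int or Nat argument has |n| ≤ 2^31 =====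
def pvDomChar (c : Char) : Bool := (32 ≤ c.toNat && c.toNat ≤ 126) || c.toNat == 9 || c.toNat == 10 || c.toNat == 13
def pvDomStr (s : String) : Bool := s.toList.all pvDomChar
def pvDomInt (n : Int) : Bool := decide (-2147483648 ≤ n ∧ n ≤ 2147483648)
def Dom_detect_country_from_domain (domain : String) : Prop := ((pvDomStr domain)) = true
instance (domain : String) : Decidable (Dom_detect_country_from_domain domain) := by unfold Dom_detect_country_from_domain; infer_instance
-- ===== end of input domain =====

-- B builds the TLD table from a compact "tld=country;…" data string and, instead of A's
-- endswith scan over the length-sorted 45-entry table, walks the domain's dot positions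
-- left to right, returning the table value of the first suffix present (objective:
-- alternative — O(#labels) dict lookups instead of a full table scan).

-- ===== PORT A =====
-- the dict literal of Source A (same 45 pairs, same order)
def pvTldPairs : List (String × String) :=
  [(".uk", "UK"), (".ac.uk", "UK"), (".edu.au", "Australia"),
   (".au", "Australia"), (".ca", "Canada"), (".de", "Germany"),
   (".fr", "France"), (".nl", "Netherlands"), (".se", "Sweden"),
   (".no", "Norway"), (".fi", "Finland"), (".dk", "Denmark"),
   (".ch", "Switzerland"), (".at", "Austria"), (".be", "Belgium"),
   (".it", "Italy"), (".es", "Spain"), (".pt", "Portugal"),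
   (".pl", "Poland"), (".cz", "Czech Republic"), (".tr", "Turkey"),
   (".sa", "Saudi Arabia"), (".ae", "UAE"), (".qa", "Qatar"),
   (".jo", "Jordan"), (".cn", "China"), (".jp", "Japan"),
   (".kr", "South Korea"), (".my", "Malaysia"), (".sg", "Singapore"),
   (".th", "Thailand"), (".nz", "New Zealand"), (".za", "South Africa"),
   (".eg", "Egypt"), (".ma", "Morocco"), (".ng", "Nigeria"),
   (".br", "Brazil"), (".mx", "Mexico"), (".ar", "Argentina"),
   (".pk", "Pakistan"), (".in", "India"), (".bd", "Bangladesh"),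
   (".edu", "USA"), (".edu.cn", "China"), (".edu.pk", "Pakistan")]

-- A's for-loop with early return over sorted(tlds.items(), key=lambda x: -len(x[0]))
def pvLoopA (domain : String) : List (String × String) → String
  | [] => "International"
  | (tld, country) :: rest =>
    if PySem.Str.endswith domain tld then country else pvLoopA domain rest

def detect_country_from_domain (domain : String) : String :=
  pvLoopA domain
    (PySem.List.sorted (PySem.Dict.mk pvTldPairs).items (fun x => -(PySem.Str.len x.1)) false)

-- ===== PORT B =====
-- Source B's _TLD_DATA constant
def pvTldData : String :=
  ".uk=UK;.ac.uk=UK;.edu.au=Australia;.au=Australia;.ca=Canada;.de=Germany;" ++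
  ".fr=France;.nl=Netherlands;.se=Sweden;.no=Norway;.fi=Finland;.dk=Denmark;" ++
  ".ch=Switzerland;.at=Austria;.be=Belgium;.it=Italy;.es=Spain;.pt=Portugal;" ++
  ".pl=Poland;.cz=Czech Republic;.tr=Turkey;.sa=Saudi Arabia;.ae=UAE;.qa=Qatar;" ++
  ".jo=Jordan;.cn=China;.jp=Japan;.kr=South Korea;.my=Malaysia;.sg=Singapore;" ++
  ".th=Thailand;.nz=New Zealand;.za=South Africa;.eg=Egypt;.ma=Morocco;.ng=Nigeria;" ++
  ".br=Brazil;.mx=Mexico;.ar=Argentina;.pk=Pakistan;.in=India;.bd=Bangladesh;" ++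
  ".edu=USA;.edu.cn=China;.edu.pk=Pakistan"

-- the table-building loop: for entry in _TLD_DATA.split(';'): tld, country = entry.split('=')
-- (every entry contains exactly one '=', so the unpacking never raises; the fallback
-- branch of the match is unreachable)
def pvBuild : PySem.Dict String String :=
  ((PySem.Str.split? pvTldData ";").getD []).foldl  -- split? is `some` here: the separator ";" is nonempty
    (fun d e =>
      match (PySem.Str.split? e "=").getD [] with  -- likewise "="
      | [tld, country] => d.insert tld country
      | _ => d)
    PySem.Dict.empty

-- Source B's scan over the positions of domain: at each '.', check membership, then index
def pvLoopB (tlds : PySem.Dict String String) : List Char → String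
  | [] => "International"
  | c :: rest =>
    if c = '.' then
      if tlds.contains (String.ofList (c :: rest)) then
        tlds.getD (String.ofList (c :: rest)) ""   -- tlds[suffix]; key present, KeyError impossible
      else pvLoopB tlds rest
    else pvLoopB tlds rest

def detect_country_from_domain_alt (domain : String) : String :=
  pvLoopB pvBuild domain.toList

-- ===== PRECONDITION & SPEC =====
def Spec_detect_country_from_domain (domain : String) (out : String) : Prop := out = detect_country_from_domain_alt domain
instance (domain : String) (out : String) : Decidable (Spec_detect_country_from_domain domain out) := by unfold Spec_detect_country_from_domain; infer_instance

-- ===== CLAIM (what is proved, stated in full; the proofs are below) =====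
def Claim_equal_detect_country_from_domain : Prop := ∀ (domain : String), Dom_detect_country_from_domain domain → Spec_detect_country_from_domain domain (detect_country_from_domain domain)

-- ===== LEMMAS AND PROOFS =====

-- B's parsed table is exactly A's dict literal
set_option maxRecDepth 40000 in
set_option maxHeartbeats 2000000 in
theorem pvBuild_eq : pvBuild = PySem.Dict.mk pvTldPairs := by decide

theorem pvEndswith_iff (d t : String) : PySem.Str.endswith d t = true ↔ t.toList <:+ d.toList := by
  simp [PySem.Chars.endswith_iff]

-- dict lookup in a literal dict with distinct keys = association-list membership
theorem pvGet?_mk_iff (ps : List (String × String)) (k : String) (v : String)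
    (hnd : (ps.map (·.1)).Nodup) :
    (PySem.Dict.mk ps).get? k = some v ↔ (k, v) ∈ ps := by
  induction ps with
  | nil => simp [PySem.Dict.get?]
  | cons p rest ih =>
    obtain ⟨a, b⟩ := p
    simp only [List.map_cons, List.nodup_cons] at hnd
    rw [PySem.Dict.get?_mk_cons]
    by_cases hak : a = k
    · subst hak
      simp only [beq_self_eq_true, if_true, List.mem_cons, Option.some_inj]
      constructor
      · rintro rfl; exact Or.inl rfl
      · rintro (h | h)
        · exact (Prod.mk.injEq .. ▸ h).2.symm
        · exact absurd (List.mem_map_of_mem (f := (·.1)) h) hnd.1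
    · simp only [beq_iff_eq, hak, if_false, List.mem_cons]
      rw [ih hnd.2]
      constructor
      · exact Or.inr
      · rintro (h | h)
        · exact absurd ((Prod.mk.injEq .. ▸ h).1).symm hak
        · exact h

-- A's scan ignores a leading character no key reaches
theorem pvLoopA_cons (keys : List (String × String)) (c : Char) (rest : List Char)
    (h : ∀ p ∈ keys, p.1.toList ≠ c :: rest) :
    pvLoopA (String.ofList (c :: rest)) keys = pvLoopA (String.ofList rest) keys := by
  induction keys with
  | nil => rfl
  | cons p tail ih =>
    obtain ⟨t, u⟩ := p
    have ht : t.toList ≠ c :: rest := h (t, u) (List.mem_cons_self ..)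
    have : PySem.Str.endswith (String.ofList (c :: rest)) t
         = PySem.Str.endswith (String.ofList rest) t := by
      by_cases hs : t.toList <:+ rest
      · rw [(pvEndswith_iff _ t).2 (by rw [String.toList_ofList]; exact hs.trans (List.suffix_cons c rest)),
            (pvEndswith_iff _ t).2 (by rw [String.toList_ofList]; exact hs)]
      · have h1 : ¬ t.toList <:+ c :: rest := by
          rw [List.suffix_cons_iff]; rintro (h' | h'); exacts [ht h', hs h']
        have e1 : PySem.Str.endswith (String.ofList (c :: rest)) t = false := by
          rw [Bool.eq_false_iff]; intro hx
          exact h1 (by have := (pvEndswith_iff _ t).1 hx; rwa [String.toList_ofList] at this)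
        have e2 : PySem.Str.endswith (String.ofList rest) t = false := by
          rw [Bool.eq_false_iff]; intro hx
          exact hs (by have := (pvEndswith_iff _ t).1 hx; rwa [String.toList_ofList] at this)
        rw [e1, e2]
    simp only [pvLoopA, this]
    split
    · rfl
    · exact ih (fun p hp => h p (List.mem_cons_of_mem _ hp))

theorem pvLoopA_nil (keys : List (String × String))
    (h : ∀ p ∈ keys, p.1.toList ≠ []) :
    pvLoopA (String.ofList []) keys = "International" := by
  induction keys with
  | nil => rfl
  | cons p tail ih =>
    obtain ⟨t, u⟩ := p
    have ht : PySem.Str.endswith (String.ofList []) t = false := by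
      rw [Bool.eq_false_iff, Ne, pvEndswith_iff, String.toList_ofList, List.suffix_nil]
      exact h (t, u) (List.mem_cons_self ..)
    simp only [pvLoopA, ht, Bool.false_eq_true, if_false]
    exact ih (fun p hp => h p (List.mem_cons_of_mem _ hp))

-- on a length-sorted duplicate-free table, the scan returns the table's value of the
-- whole domain whenever the whole domain is a key (it is the longest possible match)
theorem pvLoopA_mem (keys : List (String × String)) (l : List Char) (v : String)
    (hs : keys.Pairwise (fun a b => b.1.toList.length ≤ a.1.toList.length))
    (hnd : (keys.map (·.1)).Nodup)
    (hm : (String.ofList l, v) ∈ keys) :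
    pvLoopA (String.ofList l) keys = v := by
  induction keys with
  | nil => exact absurd hm (List.not_mem_nil)
  | cons p tail ih =>
    obtain ⟨t, u⟩ := p
    rw [List.pairwise_cons] at hs
    simp only [List.map_cons, List.nodup_cons] at hnd
    by_cases he : PySem.Str.endswith (String.ofList l) t = true
    · simp only [pvLoopA, he, if_true]
      rw [pvEndswith_iff, String.toList_ofList] at he
      rcases List.mem_cons.1 hm with h | h
      · exact ((Prod.mk.injEq .. ▸ h).2).symm
      · exfalso
        have hlen : l.length ≤ t.toList.length := by
          have := hs.1 _ h
          rwa [String.toList_ofList] at this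
        have : t.toList = l := he.eq_of_length (le_antisymm (he.length_le) hlen)
        have ht : t = String.ofList l := by rw [← this, String.ofList_toList]
        exact hnd.1 (ht ▸ List.mem_map_of_mem (f := (·.1)) h)
    · simp only [pvLoopA, he]
      have hne : (String.ofList l, v) ≠ (t, u) := by
        rintro h'
        have : t = String.ofList l := ((Prod.mk.injEq .. ▸ h').1).symm
        apply he
        rw [this, pvEndswith_iff, String.toList_ofList]
      exact ih hs.2 hnd.2 (List.mem_cons.1 hm |>.resolve_left hne)

def pvSorted : List (String × String) :=
  PySem.List.sorted (PySem.Dict.mk pvTldPairs).items (fun x => -(PySem.Str.len x.1)) false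

theorem pvSorted_mem (p : String × String) : p ∈ pvSorted ↔ p ∈ pvTldPairs := by
  exact PySem.List.mem_sorted _ _ _ _

theorem pvSorted_pairwise :
    pvSorted.Pairwise (fun a b => b.1.toList.length ≤ a.1.toList.length) := by
  have h := PySem.List.sorted_pairwise (κ := Int)
    (PySem.Dict.mk pvTldPairs).items (fun x => -(PySem.Str.len x.1))
  refine h.imp ?_
  intro a b hab
  have := neg_le_neg_iff.1 hab
  rw [PySem.Str.len_eq, PySem.Str.len_eq] at this
  exact_mod_cast this

theorem pvSorted_nodup : (pvSorted.map (·.1)).Nodup := by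
  have hperm : (pvSorted.map (·.1)).Perm (pvTldPairs.map (·.1)) :=
    (PySem.List.sorted_perm _ _ _).map _
  exact hperm.nodup_iff.2 (by decide)

theorem pvPairs_nodup : (pvTldPairs.map (·.1)).Nodup := by decide

theorem pvPairs_dot : ∀ p ∈ pvTldPairs, p.1.toList.head? = some '.' := by decide

theorem pvMain (l : List Char) :
    pvLoopA (String.ofList l) pvSorted = pvLoopB (PySem.Dict.mk pvTldPairs) l := by
  induction l with
  | nil =>
    rw [pvLoopB, pvLoopA_nil]
    intro p hp
    have := pvPairs_dot p ((pvSorted_mem p).1 hp)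
    intro h; rw [h] at this; simp at this
  | cons c rest ih =>
    by_cases hc : c = '.'
    · rcases hget : PySem.Dict.get? (PySem.Dict.mk pvTldPairs) (String.ofList (c :: rest)) with _ | v
      · -- no key equals the whole current suffix: both sides skip to rest
        have hcont : PySem.Dict.contains (PySem.Dict.mk pvTldPairs) (String.ofList (c :: rest)) = false := by
          rw [PySem.Dict.contains_eq_isSome_get?, hget]; rfl
        rw [pvLoopB, if_pos hc, hcont]
        simp only [Bool.false_eq_true, if_false]
        rw [pvLoopA_cons, ih]
        intro p hp h
        have hpk : p.1 = String.ofList (c :: rest) := by rw [← h, String.ofList_toList]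
        have : PySem.Dict.get? (PySem.Dict.mk pvTldPairs) (String.ofList (c :: rest)) = some p.2 :=
          (pvGet?_mk_iff _ _ _ pvPairs_nodup).2 (by rw [← hpk]; exact (pvSorted_mem p).1 hp)
        rw [hget] at this; simp at this
      · have hcont : PySem.Dict.contains (PySem.Dict.mk pvTldPairs) (String.ofList (c :: rest)) = true := by
          rw [PySem.Dict.contains_eq_isSome_get?, hget]; rfl
        rw [pvLoopB, if_pos hc, hcont, if_pos rfl,
            PySem.Dict.getD_of_get?_eq_some _ _ hget]
        exact pvLoopA_mem _ _ _ pvSorted_pairwise pvSorted_nodup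
          ((pvSorted_mem _).2 ((pvGet?_mk_iff _ _ _ pvPairs_nodup).1 hget))
    · rw [pvLoopB, if_neg hc]
      rw [pvLoopA_cons, ih]
      intro p hp h
      have := pvPairs_dot p ((pvSorted_mem p).1 hp)
      rw [h] at this
      exact hc (Option.some_inj.1 this)

-- ===== VERDICT (by name: the statement is the Claim_ definition above) =====
theorem detect_country_from_domain_spec : Claim_equal_detect_country_from_domain := by
  intro domain _
  show detect_country_from_domain domain = detect_country_from_domain_alt domain
  unfold detect_country_from_domain_alt
  rw [pvBuild_eq]
  have := pvMain domain.toList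
  rw [String.ofList_toList] at this
  exact this
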